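-- pv_equiv track=rewrite | github.com/um-computacion-tm/vocales-vbcrr4 | contador_vocales.py | contar_vocales
-- ===== SOURCE A (Python) =====
-- def contar_vocales(palabra):
--     vocales = ("a", "e", "i", "o", "u")
--     resultado = {}
--     palabra = palabra.lower()
--     for letra in palabra:
--         if letra in vocales:
--             # La letra es vocal
--             if letra in resultado.keys():
--                 # Sumar valor a diccionario ya existente
--                 resultado[letra] += 1
--             else:
--                 # Agregar letra por primera vez
--                 resultado[letra] = 1
--     return resultado
-- ===== SOURCE B (Python) =====
-- def contar_vocales(palabra):
--     palabra = palabra.lower()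
--     return {v: palabra.count(v) for v in dict.fromkeys(palabra) if v in ("a", "e", "i", "o", "u")}
-- ===== Notes on version B (the rewrite author's own statement) =====
-- stated objective: idiomatic
-- what changed: Replaces the incremental per-letter dict-update loop with a dict comprehension: dedupe the lowered word with dict.fromkeys (preserving first-occurrence key order) and count each vowel with str.count.
import Mathlib
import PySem

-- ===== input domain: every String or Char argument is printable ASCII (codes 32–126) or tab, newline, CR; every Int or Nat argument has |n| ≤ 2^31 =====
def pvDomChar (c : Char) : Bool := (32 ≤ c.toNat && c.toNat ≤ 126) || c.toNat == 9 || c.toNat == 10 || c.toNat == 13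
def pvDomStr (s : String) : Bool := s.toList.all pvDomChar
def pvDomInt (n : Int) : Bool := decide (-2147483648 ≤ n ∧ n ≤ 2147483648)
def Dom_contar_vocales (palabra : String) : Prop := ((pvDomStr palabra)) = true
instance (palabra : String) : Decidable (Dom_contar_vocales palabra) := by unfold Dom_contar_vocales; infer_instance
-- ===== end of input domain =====

-- B replaces A's incremental dict-update loop by an ordered-dedup dict comprehension
-- counting each present vowel with str.count (objective: more idiomatic, same results).


-- ===== PORT A =====
def contar_vocales (palabra : String) : List (String × Int) :=
  let vocales : List String := ["a", "e", "i", "o", "u"]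
  let palabra' := PySem.Str.lower palabra
  (palabra'.toList.foldl
    (fun (resultado : PySem.Dict String Int) letra =>
      let s := String.ofList [letra]
      if vocales.contains s then
        if resultado.contains s then
          resultado.modify s 0 (· + 1)
        else
          resultado.insert s 1
      else resultado)
    PySem.Dict.empty).items

-- ===== PORT B =====
def contar_vocales_alt (palabra : String) : List (String × Int) :=
  let palabra' := PySem.Str.lower palabra
  ((PySem.List.dedup palabra'.toList).filter
      (fun v => (["a", "e", "i", "o", "u"] : List String).contains (String.ofList [v]))).map
    (fun v => (String.ofList [v], (PySem.Str.count palabra' (String.ofList [v]) : Int)))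

-- ===== PRECONDITION & SPEC =====
def Spec_contar_vocales (palabra : String) (out : List (String × Int)) : Prop := out = contar_vocales_alt palabra
instance (palabra : String) (out : List (String × Int)) : Decidable (Spec_contar_vocales palabra out) := by unfold Spec_contar_vocales; infer_instance

-- ===== CLAIM (what is proved, stated in full; the proofs are below) =====
def Claim_equal_contar_vocales : Prop := ∀ (palabra : String), Dom_contar_vocales palabra → Spec_contar_vocales palabra (contar_vocales palabra)

-- ===== LEMMAS AND PROOFS =====

-- the vowel test both ports use, as a Char predicate
def pvIsVow (c : Char) : Bool := (["a", "e", "i", "o", "u"] : List String).contains (String.ofList [c])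

-- str(c) is injective
lemma pvStrOf_inj : Function.Injective (fun c : Char => String.ofList [c]) := by
  intro a b h
  simpa using congrArg String.toList h

-- a fold that skips non-p elements is a fold over the filtered list
lemma pv_foldl_if {α β : Type} (p : α → Bool) (f : β → α → β) :
    ∀ (l : List α) (init : β),
      l.foldl (fun d c => if p c then f d c else d) init = (l.filter p).foldl f init := by
  intro l
  induction l with
  | nil => intro init; rfl
  | cons h t ih =>
    intro init
    by_cases hp : p h = true <;> simp [hp, ih]

-- A's two-way branch is the counter step
lemma pv_step_eq (d : PySem.Dict String Int) (s : String) :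
    (if d.contains s then d.modify s 0 (· + 1) else d.insert s 1)
      = d.insert s (d.getD s 0 + 1) := by
  by_cases h : d.contains s = true
  · simp [h, PySem.Dict.modify]
  · have hg : d.getD s 0 = 0 := by
      simp only [PySem.Dict.getD, PySem.Dict.get?]
      have hfind : d.items.find? (fun p => p.1 == s) = none := by
        rw [List.find?_eq_none]
        intro x hx
        have h' := h
        simp only [PySem.Dict.contains, List.any_eq_true] at h'
        simp only [Bool.not_eq_true]
        by_contra hb
        simp only [Bool.not_eq_false] at hb
        exact h' ⟨x, hx, hb⟩
      simp [hfind]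
    simp [h, hg]

-- Str.count with a single-character needle is List.count
lemma pv_count_go_single (c : Char) :
    ∀ (l : List Char) (fuel acc : Nat), l.length ≤ fuel →
      PySem.Chars.count.go [c] fuel l acc = acc + l.count c := by
  intro l
  induction l with
  | nil =>
    intro fuel acc _
    cases fuel <;> simp [PySem.Chars.count.go]
  | cons h t ih =>
    intro fuel acc hf
    cases fuel with
    | zero => simp at hf
    | succ n =>
      rw [PySem.Chars.count.go]
      by_cases hc : c = h
      · subst hc
        simp only [List.isPrefixOf, BEq.rfl, Bool.and_self, if_pos]
        rw [show List.drop [c].length (c :: t) = t from rfl]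
        rw [ih _ _ (by simpa using hf)]
        simp
        omega
      · have hpf : ([c].isPrefixOf (h :: t)) = false := by
          simp [List.isPrefixOf, hc]
        rw [hpf]
        simp only [Bool.false_eq_true, if_false]
        rw [ih _ _ (by simpa using hf)]
        have hne : h ≠ c := fun e => hc e.symm
        simp [hne]

lemma pv_count_single (s : String) (c : Char) :
    PySem.Str.count s (String.ofList [c]) = s.toList.count c := by
  rw [PySem.Str.count_eq]
  have : (String.ofList [c]).toList = [c] := by simp
  rw [this, PySem.Chars.count]
  simp only [List.isEmpty_cons, Bool.false_eq_true, if_false]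
  simpa using pv_count_go_single c s.toList s.toList.length 0 le_rfl

-- Set.ofList commutes with map by an injective function
lemma pv_add_map {α β : Type} [DecidableEq α] [DecidableEq β] (f : α → β)
    (hf : Function.Injective f) (s : PySem.Set α) (x : α) :
    PySem.Set.add (s.map f) (f x) = (PySem.Set.add s x).map f := by
  have hc : (List.map f s).contains (f x) = s.contains x := by
    simp only [PySem.Set.contains]
    by_cases h : x ∈ s
    · simp [h, List.mem_map.mpr ⟨x, h, rfl⟩]
    · have : f x ∉ List.map f s := by
        intro hm
        obtain ⟨y, hy, hxy⟩ := List.mem_map.mp hm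
        exact h (hf hxy ▸ hy)
      simp [h, this]
  simp only [PySem.Set.add, PySem.Set.contains, hc]
  by_cases h : x ∈ s <;> simp [h]

lemma pv_ofList_map {α β : Type} [DecidableEq α] [DecidableEq β] (f : α → β)
    (hf : Function.Injective f) (xs : List α) :
    PySem.Set.ofList (xs.map f) = (PySem.Set.ofList xs).map f := by
  rw [PySem.Set.ofList_eq_foldl, PySem.Set.ofList_eq_foldl]
  suffices h : ∀ (s : PySem.Set α),
      (xs.map f).foldl PySem.Set.add (s.map f) = (xs.foldl PySem.Set.add s).map f by
    simpa using h []
  induction xs with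
  | nil => intro s; rfl
  | cons x t ih =>
    intro s
    simp only [List.map_cons, List.foldl_cons, pv_add_map f hf s x]
    exact ih _

-- Set.ofList commutes with filter
lemma pv_add_filter {α : Type} [DecidableEq α] (p : α → Bool) (s : PySem.Set α) (x : α) :
    (PySem.Set.add s x).filter p = if p x then PySem.Set.add (s.filter p) x else s.filter p := by
  simp only [PySem.Set.add, PySem.Set.contains, List.contains_iff_mem]
  by_cases hp : p x = true
  · by_cases h : x ∈ s
    · have h2 : x ∈ List.filter p s := List.mem_filter.mpr ⟨h, hp⟩
      simp [h, h2, hp]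
    · have h2 : x ∉ List.filter p s := fun hm => h (List.mem_filter.mp hm).1
      simp [h, h2, hp, List.filter_append]
  · by_cases h : x ∈ s <;> simp [h, hp]

lemma pv_ofList_filter {α : Type} [DecidableEq α] (p : α → Bool) (xs : List α) :
    PySem.Set.ofList (xs.filter p) = (PySem.Set.ofList xs).filter p := by
  rw [PySem.Set.ofList_eq_foldl, PySem.Set.ofList_eq_foldl]
  suffices h : ∀ (s : PySem.Set α),
      (xs.filter p).foldl PySem.Set.add (s.filter p) = (xs.foldl PySem.Set.add s).filter p by
    simpa using h []
  induction xs with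
  | nil => intro s; rfl
  | cons x t ih =>
    intro s
    by_cases hp : p x = true
    · simp only [List.filter_cons, hp, if_pos, List.foldl_cons]
      rw [← ih (PySem.Set.add s x), pv_add_filter p s x, if_pos hp]
    · simp only [List.filter_cons, hp, List.foldl_cons]
      rw [← ih (PySem.Set.add s x), pv_add_filter p s x, if_neg hp]
      rfl

-- characterisation of port A's fold
lemma pv_A_eq (l : List Char) :
    (l.foldl
      (fun (resultado : PySem.Dict String Int) letra =>
        let s := String.ofList [letra]
        if (["a", "e", "i", "o", "u"] : List String).contains s then
          if resultado.contains s then resultado.modify s 0 (· + 1)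
          else resultado.insert s 1
        else resultado)
      PySem.Dict.empty).items
    = (PySem.Set.ofList (l.filter pvIsVow)).map
        (fun c => (String.ofList [c], (l.count c : Int))) := by
  show (l.foldl
      (fun (d : PySem.Dict String Int) c =>
        if pvIsVow c = true then
          (if d.contains (String.ofList [c]) = true then d.modify (String.ofList [c]) 0 (· + 1)
           else d.insert (String.ofList [c]) 1)
        else d)
      PySem.Dict.empty).items = _
  rw [pv_foldl_if pvIsVow
    (fun (d : PySem.Dict String Int) c =>
      if d.contains (String.ofList [c]) = true then d.modify (String.ofList [c]) 0 (· + 1)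
      else d.insert (String.ofList [c]) 1) l PySem.Dict.empty]
  have h2 : ((l.filter pvIsVow).foldl
      (fun (d : PySem.Dict String Int) c =>
        if d.contains (String.ofList [c]) = true then d.modify (String.ofList [c]) 0 (· + 1)
        else d.insert (String.ofList [c]) 1) PySem.Dict.empty)
      = ((l.filter pvIsVow).map (fun c => String.ofList [c])).foldl
          (fun (d : PySem.Dict String Int) s => d.insert s (d.getD s 0 + 1))
          PySem.Dict.empty := by
    rw [List.foldl_map]
    exact PySem.List.foldl_congr_mem _ _ _ _ (fun d c _ => pv_step_eq d (String.ofList [c]))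
  rw [h2, PySem.Dict.foldl_insert_getD_add_one_eq_counter, PySem.Dict.items_counter,
    pv_ofList_map (fun c => String.ofList [c]) pvStrOf_inj (l.filter pvIsVow)]
  rw [List.map_map]
  apply List.map_congr_left
  intro c hc
  have hcv : pvIsVow c = true :=
    (List.mem_filter.mp ((PySem.Set.mem_ofList _ _).mp hc)).2
  have hcnt : List.count (String.ofList [c]) ((l.filter pvIsVow).map (fun c => String.ofList [c]))
      = List.count c (l.filter pvIsVow) :=
    List.count_map_of_injective _ _ pvStrOf_inj c
  simp only [Function.comp]
  rw [hcnt, List.count_filter hcv]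

-- ===== VERDICT (by name: the statement is the Claim_ definition above) =====
theorem contar_vocales_spec : Claim_equal_contar_vocales := by
  intro palabra _
  show contar_vocales palabra = contar_vocales_alt palabra
  unfold contar_vocales contar_vocales_alt
  rw [pv_A_eq]
  show _ = ((PySem.List.dedup (PySem.Str.lower palabra).toList).filter pvIsVow).map
      (fun v => (String.ofList [v],
        (PySem.Str.count (PySem.Str.lower palabra) (String.ofList [v]) : Int)))
  rw [PySem.List.dedup_eq_ofList, ← pv_ofList_filter pvIsVow]
  apply List.map_congr_left
  intro c hc
  rw [pv_count_single]
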